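-- pv_equiv track=rewrite | github.com/dercaft/XNAS | xnas/search_space/cell_based.py | gdas_indexes_unpack
-- ===== SOURCE A (Python) =====
-- def gdas_indexes_unpack(weight,n_nodes,input_nodes=2):
--     """
--         Unpack 1d indexes list to dag
--     """
--     w_dag = []
--     start_index = 0
--     end_index = input_nodes
--     for i in range(n_nodes):
--         w_dag.append(weight[start_index:end_index])
--         start_index = end_index
--         end_index += input_nodes + i + 1
--     return w_dag
-- ===== SOURCE B (Python) =====
-- def gdas_indexes_unpack(weight, n_nodes, input_nodes=2):
--     """
--         Unpack 1d indexes list to dag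
--     """
--     # slice i has length input_nodes + i; its start offset has the closed form
--     # i*input_nodes + i*(i-1)//2, so no running accumulators are needed.
--     return [
--         weight[i * input_nodes + i * (i - 1) // 2
--                : (i + 1) * input_nodes + i * (i + 1) // 2]
--         for i in range(n_nodes)
--     ]
-- ===== Notes on version B (the rewrite author's own statement) =====
-- stated objective: simpler
-- what changed: Replaced the loop carrying running start_index/end_index accumulators by a single comprehension computing each slice's offsets from the closed form i*input_nodes + i*(i-1)//2.
import Mathlib
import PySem

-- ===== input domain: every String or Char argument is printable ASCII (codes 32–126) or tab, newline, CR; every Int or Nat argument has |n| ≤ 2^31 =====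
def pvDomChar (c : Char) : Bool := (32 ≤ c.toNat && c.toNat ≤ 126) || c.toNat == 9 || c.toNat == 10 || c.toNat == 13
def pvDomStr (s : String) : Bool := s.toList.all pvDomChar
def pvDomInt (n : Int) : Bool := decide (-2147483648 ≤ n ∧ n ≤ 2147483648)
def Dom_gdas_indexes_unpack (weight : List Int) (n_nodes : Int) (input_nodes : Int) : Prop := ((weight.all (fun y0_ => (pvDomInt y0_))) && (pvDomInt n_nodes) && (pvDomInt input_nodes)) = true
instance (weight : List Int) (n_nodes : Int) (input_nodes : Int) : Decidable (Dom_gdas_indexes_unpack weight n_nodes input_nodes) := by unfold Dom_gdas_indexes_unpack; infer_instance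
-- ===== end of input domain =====

-- B replaces the loop's running start/end accumulators with closed-form slice offsets (objective: simpler).
-- ===== PORT A =====
def gdas_indexes_unpack (weight : List Int) (n_nodes : Int) (input_nodes : Int) : List (List Int) :=
  -- w_dag = []; start_index = 0; end_index = input_nodes; for i in range(n_nodes): ...
  let st := (PySem.List.pyRange 0 n_nodes 1).foldl
    (fun (st : List (List Int) × Int × Int) i =>
      (st.1 ++ [PySem.List.slice weight (some st.2.1) (some st.2.2)],
       st.2.2,
       st.2.2 + input_nodes + i + 1))
    ([], 0, input_nodes)
  st.1

-- ===== PORT B =====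
def gdas_indexes_unpack_alt (weight : List Int) (n_nodes : Int) (input_nodes : Int) : List (List Int) :=
  (PySem.List.pyRange 0 n_nodes 1).map (fun i =>
    PySem.List.slice weight
      (some (i * input_nodes + PySem.Int.floordiv (i * (i - 1)) 2))
      (some ((i + 1) * input_nodes + PySem.Int.floordiv (i * (i + 1)) 2)))

-- ===== PRECONDITION & SPEC =====
def Spec_gdas_indexes_unpack (weight : List Int) (n_nodes : Int) (input_nodes : Int) (out : List (List Int)) : Prop := out = gdas_indexes_unpack_alt weight n_nodes input_nodes
instance (weight : List Int) (n_nodes : Int) (input_nodes : Int) (out : List (List Int)) : Decidable (Spec_gdas_indexes_unpack weight n_nodes input_nodes out) := by unfold Spec_gdas_indexes_unpack; infer_instance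

-- ===== CLAIM (what is proved, stated in full; the proofs are below) =====
def Claim_equal_gdas_indexes_unpack : Prop := ∀ (weight : List Int) (n_nodes : Int) (input_nodes : Int), Dom_gdas_indexes_unpack weight n_nodes input_nodes → Spec_gdas_indexes_unpack weight n_nodes input_nodes (gdas_indexes_unpack weight n_nodes input_nodes)


-- ===== LEMMAS AND PROOFS =====
-- closed-form start offset of slice i
def pvStart (i inp : Int) : Int := i * inp + PySem.Int.floordiv (i * (i - 1)) 2

theorem pvFd_step (a : Int) :
    PySem.Int.floordiv (a * (a + 1)) 2 = PySem.Int.floordiv (a * (a - 1)) 2 + a := by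
  rw [PySem.Int.floordiv_eq_ediv_of_pos (by norm_num), PySem.Int.floordiv_eq_ediv_of_pos (by norm_num)]
  have h : a * (a + 1) = a * (a - 1) + a * 2 := by ring
  rw [h, Int.add_mul_ediv_right _ _ (by norm_num : (2:Int) ≠ 0)]

theorem pvEnd_eq (a inp : Int) :
    (a + 1) * inp + PySem.Int.floordiv (a * (a + 1)) 2 = pvStart a inp + inp + a := by
  rw [pvFd_step]; unfold pvStart; ring

theorem pvStart_succ (a inp : Int) : pvStart (a + 1) inp = pvStart a inp + inp + a := by
  unfold pvStart
  have h : (a + 1) * (a + 1 - 1) = a * (a + 1) := by ring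
  rw [h, pvFd_step]; ring

theorem pvLoop (weight : List Int) (inp : Int) :
    ∀ (k : Nat) (a b : Int), (b - a).toNat = k → ∀ acc : List (List Int),
    ((PySem.List.pyRange a b 1).foldl
      (fun (st : List (List Int) × Int × Int) i =>
        (st.1 ++ [PySem.List.slice weight (some st.2.1) (some st.2.2)],
         st.2.2,
         st.2.2 + inp + i + 1))
      (acc, pvStart a inp, pvStart a inp + inp + a)).1
    = acc ++ (PySem.List.pyRange a b 1).map (fun i =>
        PySem.List.slice weight
          (some (i * inp + PySem.Int.floordiv (i * (i - 1)) 2))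
          (some ((i + 1) * inp + PySem.Int.floordiv (i * (i + 1)) 2))) := by
  intro k
  induction k with
  | zero =>
    intro a b h acc
    rw [PySem.List.pyRange_one_eq_nil (by omega)]
    simp
  | succ k ih =>
    intro a b h acc
    have hab : a < b := by omega
    rw [PySem.List.pyRange_one_cons hab]
    simp only [List.foldl_cons, List.map_cons]
    have h1 : pvStart a inp + inp + a = pvStart (a + 1) inp := (pvStart_succ a inp).symm
    have h2 : pvStart a inp + inp + a + inp + a + 1 = pvStart (a + 1) inp + inp + (a + 1) := by
      rw [← h1]; ring
    have h3 : PySem.List.slice weight (some (pvStart a inp)) (some (pvStart a inp + inp + a))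
        = PySem.List.slice weight
          (some (a * inp + PySem.Int.floordiv (a * (a - 1)) 2))
          (some ((a + 1) * inp + PySem.Int.floordiv (a * (a + 1)) 2)) := by
      rw [pvEnd_eq]; rfl
    rw [h3, h1]
    rw [show pvStart (a + 1) inp + inp + a + 1 = pvStart (a + 1) inp + inp + (a + 1) from by ring]
    rw [ih (a + 1) b (by omega)]
    simp

-- ===== VERDICT (by name: the statement is the Claim_ definition above) =====
theorem gdas_indexes_unpack_spec : Claim_equal_gdas_indexes_unpack := by
  intro weight n_nodes input_nodes _
  unfold Spec_gdas_indexes_unpack gdas_indexes_unpack gdas_indexes_unpack_alt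
  have h0 : (0 : Int) = pvStart 0 input_nodes := by unfold pvStart; simp [PySem.Int.floordiv]
  have h1 : input_nodes = pvStart 0 input_nodes + input_nodes + 0 := by rw [← h0]; ring
  simp only []
  rw [show (([], 0, input_nodes) : List (List Int) × Int × Int)
      = ([], pvStart 0 input_nodes, pvStart 0 input_nodes + input_nodes + 0) by rw [← h0]; norm_num]
  rw [pvLoop weight input_nodes (n_nodes - 0).toNat 0 n_nodes rfl []]
  simp
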